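-- pv_equiv track=rewrite | github.com/fkie-cad/keys-in-flux-paper-material | TLS/lldb/monitoring.py | find_masked
-- ===== SOURCE A (Python) =====
-- def find_masked(mem, pattern, mask):
--     print_count = 0;
--     for offset in range(len(mem) - len(pattern) + 1):
--         for i in range(len(pattern)):
--             if mask[i] != 0 and mem[offset + i] != pattern[i]:
--                 break
--         else:
--             return offset
--     return -1
-- ===== SOURCE B (Python) =====
-- def find_masked(mem, pattern, mask):
--     # Offset sieve: invert the loop order. Keep the list of candidate offsets
--     # and, for each relevant pattern position (mask != 0), filter it in one
--     # pass; stop as soon as no candidate survives.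
--     cand = list(range(len(mem) - len(pattern) + 1))
--     if not cand:
--         return -1
--     for i in range(len(pattern)):
--         if mask[i] != 0:
--             p = pattern[i]
--             cand = [o for o in cand if mem[o + i] == p]
--             if not cand:
--                 return -1
--     return cand[0]
-- ===== Notes on version B (the rewrite author's own statement) =====
-- stated objective: alternative
-- what changed: B inverts the loop nesting: instead of rescanning the pattern at every offset, it keeps a shrinking list of candidate offsets and filters it in one pass per relevant (mask != 0) pattern position, returning the smallest survivor (and -1 as soon as none survive); it raises IndexError on exactly the same inputs as A, which Pre_ excludes.
import Mathlib
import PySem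

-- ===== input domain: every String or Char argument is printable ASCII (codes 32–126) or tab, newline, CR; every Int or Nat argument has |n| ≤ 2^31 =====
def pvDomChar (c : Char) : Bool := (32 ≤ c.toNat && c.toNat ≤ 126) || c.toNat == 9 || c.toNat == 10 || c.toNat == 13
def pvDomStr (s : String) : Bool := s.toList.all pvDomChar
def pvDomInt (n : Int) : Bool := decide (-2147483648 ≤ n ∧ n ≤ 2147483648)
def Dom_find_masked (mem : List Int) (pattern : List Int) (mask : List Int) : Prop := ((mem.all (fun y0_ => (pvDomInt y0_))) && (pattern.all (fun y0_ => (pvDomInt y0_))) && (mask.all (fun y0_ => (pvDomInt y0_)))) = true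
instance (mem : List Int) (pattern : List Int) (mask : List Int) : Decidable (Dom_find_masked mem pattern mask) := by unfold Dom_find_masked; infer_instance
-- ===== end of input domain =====

-- B inverts the loop nesting: it filters a shrinking candidate-offset list once per relevant pattern
-- position instead of rescanning the pattern at every offset; both Pythons raise IndexError on the
-- same inputs (mask shorter than pattern with a surviving offset), so the ports agree everywhere.

-- ===== PORT A =====
-- inner 'for i in range(len(pattern))' loop: returns false iff it breaks
def pvA_inner (mem : List Int) (pattern : List Int) (mask : List Int) (offset : Int) : List Int → Bool
  | [] => true
  | i :: rest =>
    if PySem.List.pyGetD mask i 0 ≠ 0 ∧ PySem.List.pyGetD mem (offset + i) 0 ≠ PySem.List.pyGetD pattern i 0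
    then false
    else pvA_inner mem pattern mask offset rest

-- outer 'for offset in range(...)' loop with early return
def pvA_scan (mem : List Int) (pattern : List Int) (mask : List Int) : List Int → Int
  | [] => -1
  | o :: rest =>
    if pvA_inner mem pattern mask o (PySem.List.pyRange 0 (pattern.length : Int) 1) then o
    else pvA_scan mem pattern mask rest

def find_masked (mem : List Int) (pattern : List Int) (mask : List Int) : Int :=
  pvA_scan mem pattern mask (PySem.List.pyRange 0 ((mem.length : Int) - (pattern.length : Int) + 1) 1)

-- ===== PORT B =====
-- 'for i in range(len(pattern))' over the remaining positions, carrying the candidate list;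
-- cand is nonempty whenever the loop body runs (checked before entry and after every filter),
-- so the final 'cand[0]' is ported as head?.getD
def pvB_sieve (mem : List Int) (pattern : List Int) (mask : List Int) : List Int → List Int → Int
  | cand, [] => (cand.head?).getD (-1)
  | cand, i :: rest =>
    if PySem.List.pyGetD mask i 0 ≠ 0 then
      let cand' := cand.filter
        (fun o => PySem.List.pyGetD mem (o + i) 0 == PySem.List.pyGetD pattern i 0)
      if cand' = [] then -1 else pvB_sieve mem pattern mask cand' rest
    else pvB_sieve mem pattern mask cand rest

def find_masked_alt (mem : List Int) (pattern : List Int) (mask : List Int) : Int :=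
  let cand := PySem.List.pyRange 0 ((mem.length : Int) - (pattern.length : Int) + 1) 1
  if cand = [] then -1
  else pvB_sieve mem pattern mask cand (PySem.List.pyRange 0 (pattern.length : Int) 1)

-- ===== PRECONDITION & SPEC =====
-- Pre_ excludes exactly the inputs on which Python A raises IndexError (and Python B raises on the
-- very same ones): mask shorter than pattern while some offset passes every in-range relevant check,
-- so the scan runs past the end of mask.
def Pre_find_masked (mem : List Int) (pattern : List Int) (mask : List Int) : Prop :=
  pattern.length ≤ mask.length ∨
    ∀ o ∈ List.range (mem.length + 1 - pattern.length),
      ∃ i ∈ List.range mask.length,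
        mask.getD i 0 ≠ 0 ∧ mem.getD (o + i) 0 ≠ pattern.getD i 0
instance (mem : List Int) (pattern : List Int) (mask : List Int) : Decidable (Pre_find_masked mem pattern mask) := by unfold Pre_find_masked; infer_instance

def pvWitness_find_masked : List Int × List Int × List Int := ([1, 2, 3, 2], [2, 0], [1, 0])

def Spec_find_masked (mem : List Int) (pattern : List Int) (mask : List Int) (out : Int) : Prop := out = find_masked_alt mem pattern mask
instance (mem : List Int) (pattern : List Int) (mask : List Int) (out : Int) : Decidable (Spec_find_masked mem pattern mask out) := by unfold Spec_find_masked; infer_instance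

-- ===== CLAIM (what is proved, stated in full; the proofs are below) =====
def Claim_equal_find_masked : Prop := ∀ (mem : List Int) (pattern : List Int) (mask : List Int), Dom_find_masked mem pattern mask → Pre_find_masked mem pattern mask → Spec_find_masked mem pattern mask (find_masked mem pattern mask)

-- ===== LEMMAS AND PROOFS =====

-- the per-position test as B performs it
def pvCheck (mem : List Int) (pattern : List Int) (mask : List Int) (o i : Int) : Bool :=
  if PySem.List.pyGetD mask i 0 ≠ 0
  then (PySem.List.pyGetD mem (o + i) 0 == PySem.List.pyGetD pattern i 0)
  else true

-- A's inner loop is an 'all' over its index list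
theorem pvA_inner_eq_all (mem pattern mask : List Int) (o : Int) (is : List Int) :
    pvA_inner mem pattern mask o is =
      is.all (fun i => !(decide (PySem.List.pyGetD mask i 0 ≠ 0 ∧
        PySem.List.pyGetD mem (o + i) 0 ≠ PySem.List.pyGetD pattern i 0))) := by
  induction is with
  | nil => rfl
  | cons i rest ih =>
    by_cases h : PySem.List.pyGetD mask i 0 ≠ 0 ∧
        PySem.List.pyGetD mem (o + i) 0 ≠ PySem.List.pyGetD pattern i 0
    · simp [pvA_inner, h]
    · simp only [pvA_inner, if_neg h, ih, List.all_cons, decide_eq_false h,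
        Bool.not_false, Bool.true_and]

-- A's early-return scan is a first-match search
theorem pvA_scan_eq_find (mem pattern mask : List Int) (f : Int → Bool)
    (os : List Int)
    (h : ∀ o ∈ os, pvA_inner mem pattern mask o
        (PySem.List.pyRange 0 (pattern.length : Int) 1) = f o) :
    pvA_scan mem pattern mask os = ((os.find? f).getD (-1)) := by
  induction os with
  | nil => rfl
  | cons o rest ih =>
    have ho := h o (by simp)
    by_cases hc : f o = true
    · simp [pvA_scan, ho, hc, List.find?]
    · simp only [Bool.not_eq_true] at hc
      simp [pvA_scan, ho, hc, List.find?, ih (fun x hx => h x (by simp [hx]))]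

-- A's per-position test is B's
theorem pv_check_eq (a b c : Int) :
    (!(decide (a ≠ 0 ∧ b ≠ c))) = (if a ≠ 0 then (b == c) else true) := by
  by_cases h1 : a = 0
  · simp [h1]
  · by_cases h2 : b = c
    · simp [h1, h2]
    · simp [h1, h2]

-- the head of a filtered list is the first match
theorem pv_head_filter {α : Type} (p : α → Bool) (l : List α) :
    (l.filter p).head? = l.find? p := by
  induction l with
  | nil => rfl
  | cons a rest ih =>
    by_cases h : p a = true
    · simp [h]
    · simp only [Bool.not_eq_true] at h
      simp [h, ih]

-- B's sieve keeps exactly the candidates passing every remaining position, and returns the first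
theorem pvB_sieve_spec (mem pattern mask : List Int) :
    ∀ (is cand : List Int),
      pvB_sieve mem pattern mask cand is
        = ((cand.filter (fun o => is.all (pvCheck mem pattern mask o))).head?).getD (-1) := by
  intro is
  induction is with
  | nil =>
    intro cand
    simp [pvB_sieve, List.all_nil, List.filter_true]
  | cons i rest ih =>
    intro cand
    have hsplit : cand.filter (fun o => (i :: rest).all (pvCheck mem pattern mask o))
        = (cand.filter (fun o => pvCheck mem pattern mask o i)).filter
            (fun o => rest.all (pvCheck mem pattern mask o)) := by
      rw [List.filter_filter]
      exact List.filter_congr (fun a _ => by rw [List.all_cons, Bool.and_comm])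
    by_cases h : PySem.List.pyGetD mask i 0 ≠ 0
    · have hch : (fun o => pvCheck mem pattern mask o i)
          = (fun o => PySem.List.pyGetD mem (o + i) 0 == PySem.List.pyGetD pattern i 0) := by
        funext o
        simp only [pvCheck, if_pos h]
      rw [hsplit, hch]
      simp only [pvB_sieve, if_pos h]
      by_cases hc : cand.filter
          (fun o => PySem.List.pyGetD mem (o + i) 0 == PySem.List.pyGetD pattern i 0) = []
      · rw [if_pos hc, hc]
        rfl
      · rw [if_neg hc]
        exact ih _
    · have hch : (fun o => (i :: rest).all (pvCheck mem pattern mask o))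
          = (fun o => rest.all (pvCheck mem pattern mask o)) := by
        funext o
        simp only [List.all_cons, pvCheck, if_neg h, Bool.true_and]
      rw [hch]
      simp only [pvB_sieve, if_neg h]
      exact ih cand

-- ===== VERDICT (by name: the statement is the Claim_ definition above) =====
theorem find_masked_spec : Claim_equal_find_masked := by
  intro mem pattern mask _hd _hpre
  -- the two ports agree on every input (both Pythons raise on the same inputs, outside Pre_)
  unfold Spec_find_masked find_masked find_masked_alt
  rw [pvA_scan_eq_find mem pattern mask
    (fun o => (PySem.List.pyRange 0 (pattern.length : Int) 1).all
      (pvCheck mem pattern mask o)) _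
    (fun o _ => by
      rw [pvA_inner_eq_all]
      exact congrArg (List.all _) (funext (fun i => by rw [pv_check_eq]; rfl)))]
  by_cases hc : PySem.List.pyRange 0 ((mem.length : Int) - (pattern.length : Int) + 1) 1 = []
  · rw [if_pos hc, hc]
    rfl
  · rw [if_neg hc, pvB_sieve_spec, pv_head_filter]
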